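-- pv_equiv track=rewrite | github.com/ctwobosius/GamesCraftersSolver | Tester TTT.py | Unhash
-- ===== SOURCE A (Python) =====
-- def Unhash(hash):
--     """Converts ternary numbers to "xo-" strings
--     >>> Unhash(120000000)
--     "xo-------"
--     """
--     pos_str = ""
--     while hash != 0:
--         ones = hash % 10
--         if ones == 0:
--             pos_str = "-" + pos_str
--         elif ones == 1:
--             pos_str = "x" + pos_str
--         else:
--             pos_str = "o" + pos_str
--         hash = hash // 10
--     return pos_str
-- ===== SOURCE B (Python) =====
-- def Unhash(hash):
--     """Converts ternary numbers to "xo-" strings by one decimal-string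
--     conversion and a forward character map (no modular loop, no prepends)."""
--     if hash == 0:
--         return ""
--     table = {'0': '-', '1': 'x'}
--     return ''.join(table.get(c, 'o') for c in str(hash))
-- ===== Notes on version B (the rewrite author's own statement) =====
-- stated objective: idiomatic
-- what changed: B replaces the modular digit-extraction loop with prepended characters by a single decimal-string conversion and one forward character-map join (with an empty result on a zero hash, as in A).
import Mathlib
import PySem

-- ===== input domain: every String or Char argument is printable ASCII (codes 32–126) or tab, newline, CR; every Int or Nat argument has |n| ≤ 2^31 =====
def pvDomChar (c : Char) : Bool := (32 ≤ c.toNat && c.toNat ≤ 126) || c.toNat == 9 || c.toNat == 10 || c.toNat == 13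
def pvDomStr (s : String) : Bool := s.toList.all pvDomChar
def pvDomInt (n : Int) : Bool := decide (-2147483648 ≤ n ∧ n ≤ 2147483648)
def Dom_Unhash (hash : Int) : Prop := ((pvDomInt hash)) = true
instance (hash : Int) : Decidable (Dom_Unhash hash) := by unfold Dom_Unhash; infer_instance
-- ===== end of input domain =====

-- A = digit loop (%10, //10) prepending chars; B = one str() conversion + forward char map.
-- Objective: idiomatic one-pass rewrite. Pre_ excludes negative hash, where Python A loops forever.


-- ===== PORT A =====
-- The while loop, on the Nat value of hash (Pre_ gives 0 ≤ hash; for negative hash the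
-- Python loop never terminates, so those inputs are outside Pre_). Characters are
-- accumulated as a List Char and packed with String.mk at the end (Python's string prepend).
def unhashLoopA (h : Nat) (acc : List Char) : List Char :=
  if hh : h = 0 then acc
  else
    unhashLoopA (h / 10)
      ((if h % 10 = 0 then '-' else if h % 10 = 1 then 'x' else 'o') :: acc)
termination_by h
decreasing_by exact Nat.div_lt_self (Nat.pos_of_ne_zero hh) (by omega)

def Unhash (hash : Int) : String := String.mk (unhashLoopA hash.toNat [])

-- ===== PORT B =====
-- table.get(c, 'o') for the two-entry table {'0': '-', '1': 'x'}
def unhashMapB (c : Char) : Char := if c = '0' then '-' else if c = '1' then 'x' else 'o'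

def Unhash_alt (hash : Int) : String :=
  if hash = 0 then ""
  else String.mk ((PySem.Int.toStr hash).toList.map unhashMapB)

-- ===== PRECONDITION & SPEC =====
-- Pre_ excludes negative hash: there Python A never returns (hash // 10 stays -1 forever).
def Pre_Unhash (hash : Int) : Prop := 0 ≤ hash
instance (hash : Int) : Decidable (Pre_Unhash hash) := by unfold Pre_Unhash; infer_instance
def pvWitness_Unhash : Int := (120000000)
def Spec_Unhash (hash : Int) (out : String) : Prop := out = Unhash_alt hash
instance (hash : Int) (out : String) : Decidable (Spec_Unhash hash out) := by unfold Spec_Unhash; infer_instance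

-- ===== CLAIM (what is proved, stated in full; the proofs are below) =====
def Claim_equal_Unhash : Prop := ∀ (hash : Int), Dom_Unhash hash → Pre_Unhash hash → Spec_Unhash hash (Unhash hash)

-- ===== LEMMAS AND PROOFS =====

lemma unhashMapB_digitChar (n : Nat) :
    unhashMapB (Nat.digitChar (n % 10)) =
      (if n % 10 = 0 then '-' else if n % 10 = 1 then 'x' else 'o') := by
  have h : n % 10 < 10 := Nat.mod_lt _ (by omega)
  interval_cases h' : n % 10 <;> simp [unhashMapB, Nat.digitChar]

lemma unhashLoopA_toDigitsCore (fuel : Nat) :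
    ∀ (n : Nat) (acc : List Char), n < fuel → n ≠ 0 →
      unhashLoopA n (acc.map unhashMapB) = (Nat.toDigitsCore 10 fuel n acc).map unhashMapB := by
  induction fuel with
  | zero => intro n acc h; omega
  | succ fuel ih =>
    intro n acc hlt hn
    rw [unhashLoopA]
    simp only [hn, dite_false, Nat.toDigitsCore]
    by_cases hdiv : n / 10 = 0
    · rw [hdiv, unhashLoopA]
      simp [unhashMapB_digitChar n]
    · simp only [hdiv, if_false]
      have : (if n % 10 = 0 then '-' else if n % 10 = 1 then 'x' else 'o') :: acc.map unhashMapB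
          = (Nat.digitChar (n % 10) :: acc).map unhashMapB := by
        simp [unhashMapB_digitChar n]
      rw [this]
      exact ih (n / 10) _ (by omega) hdiv

lemma unhashLoopA_eq_toDigits (n : Nat) (hn : n ≠ 0) :
    unhashLoopA n [] = (Nat.toDigits 10 n).map unhashMapB := by
  have := unhashLoopA_toDigitsCore (n + 1) n [] (by omega) hn
  simpa [Nat.toDigits] using this

-- ===== VERDICT (by name: the statement is the Claim_ definition above) =====
theorem Unhash_spec : Claim_equal_Unhash := by
  intro hash _ hpre
  unfold Spec_Unhash Unhash Unhash_alt
  by_cases h0 : hash = 0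
  · subst h0
    rw [unhashLoopA]
    rfl
  · have hpos : 0 < hash := lt_of_le_of_ne hpre (Ne.symm h0)
    simp only [h0, if_false]
    rw [PySem.Int.toList_toStr]
    have hneg : ¬ hash < 0 := by omega
    simp only [PySem.Int.toChars, hneg, if_false]
    have hn : hash.toNat ≠ 0 := by omega
    rw [unhashLoopA_eq_toDigits _ hn]
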